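-- pv_equiv track=rewrite | github.com/ahavrylyuk/hackerrank | python3/anagram.py | anagram_replace_count
-- ===== SOURCE A (Python) =====
-- from collections import Counter
--
-- def anagram_replace_count(s):
--     len_s = len(s)
--
--     if len_s % 2 is not 0:
--         return -1
--
--     s1 = Counter(s[:len_s//2])
--     s2 = Counter(s[len_s//2:])
--
--     negative = positive = 0
--
--     for l, count in s1.items():
--         diff = s2.get(l, 0) - count
--         if diff > 0:
--             positive += diff
--         if diff < 0:
--             negative += diff
--
--     return max(map(abs, (positive, negative)))
-- ===== SOURCE B (Python) =====
-- def anagram_replace_count(s):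
--     n = len(s)
--     if n % 2 != 0:
--         return -1
--     a = sorted(s[:n // 2])
--     b = sorted(s[n // 2:])
--     i = j = matches = 0
--     while i < len(a) and j < len(b):
--         if a[i] == b[j]:
--             matches += 1
--             i += 1
--             j += 1
--         elif a[i] < b[j]:
--             i += 1
--         else:
--             j += 1
--     return n // 2 - matches
-- ===== Notes on version B (the rewrite author's own statement) =====
-- stated objective: alternative
-- what changed: Replaces the Counter-based diff loop (two accumulators, max of absolute values) by sort-then-two-pointer merge: both halves are sorted and scanned in lockstep counting multiset matches, and the answer is half-length minus the match count; no Counter or hashing at all.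
import Mathlib
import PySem

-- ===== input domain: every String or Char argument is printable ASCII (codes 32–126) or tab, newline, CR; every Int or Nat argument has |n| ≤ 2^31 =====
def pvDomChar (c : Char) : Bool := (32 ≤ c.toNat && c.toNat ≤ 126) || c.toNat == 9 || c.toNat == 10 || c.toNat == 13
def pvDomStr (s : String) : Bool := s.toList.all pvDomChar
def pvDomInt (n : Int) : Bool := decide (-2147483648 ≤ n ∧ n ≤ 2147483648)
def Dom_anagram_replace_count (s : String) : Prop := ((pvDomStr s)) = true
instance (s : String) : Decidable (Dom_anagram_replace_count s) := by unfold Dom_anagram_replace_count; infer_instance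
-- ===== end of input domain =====

-- B drops the Counter diff loop entirely: it sorts both halves and counts multiset matches
-- with a two-pointer merge scan; the answer is half-length minus the match count.
-- Objective: alternative (sorting + merging instead of hash counting).

-- ===== PORT A =====
def anagram_replace_count (s : String) : Int :=
  let len_s : Int := PySem.Str.len s
  if PySem.Int.mod len_s 2 ≠ 0 then -1
  else
    let s1 := PySem.Dict.counter (PySem.List.slice s.toList none (some (PySem.Int.floordiv len_s 2)))
    let s2 := PySem.Dict.counter (PySem.List.slice s.toList (some (PySem.Int.floordiv len_s 2)) none)
    let r := s1.items.foldl (fun (acc : Int × Int) lc =>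
      let diff := s2.getD lc.1 0 - lc.2
      let acc2 := if diff > 0 then (acc.1, acc.2 + diff) else acc
      if diff < 0 then (acc2.1 + diff, acc2.2) else acc2) ((0 : Int), (0 : Int))
    max |r.2| |r.1|

-- ===== PORT B =====
-- B's while loop over indices i, j: the two-pointer merge scan, as recursion on the
-- two suffixes a[i:], b[j:] (the same comparisons in the same order).
def anagramMatch : List Char → List Char → Nat
  | [], _ => 0
  | _ :: _, [] => 0
  | x :: xs, y :: ys =>
    if x = y then anagramMatch xs ys + 1
    else if x < y then anagramMatch xs (y :: ys)
    else anagramMatch (x :: xs) ys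
termination_by a b => a.length + b.length

def anagram_replace_count_alt (s : String) : Int :=
  let n : Int := PySem.Str.len s
  if PySem.Int.mod n 2 ≠ 0 then -1
  else
    let a := PySem.List.sorted (PySem.List.slice s.toList none (some (PySem.Int.floordiv n 2))) (fun c => c) false
    let b := PySem.List.sorted (PySem.List.slice s.toList (some (PySem.Int.floordiv n 2)) none) (fun c => c) false
    PySem.Int.floordiv n 2 - (anagramMatch a b : Int)

-- ===== PRECONDITION & SPEC =====
def Spec_anagram_replace_count (s : String) (out : Int) : Prop := out = anagram_replace_count_alt s
instance (s : String) (out : Int) : Decidable (Spec_anagram_replace_count s out) := by unfold Spec_anagram_replace_count; infer_instance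

-- ===== CLAIM (what is proved, stated in full; the proofs are below) =====
def Claim_equal_anagram_replace_count : Prop := ∀ (s : String), Dom_anagram_replace_count s → Spec_anagram_replace_count s (anagram_replace_count s)

-- ===== LEMMAS AND PROOFS =====

-- Multiset intersection absorbs a left head absent from the right side.
theorem pvInterConsLeft (x : Char) (s t : Multiset Char) (h : t.count x = 0) :
    (x ::ₘ s) ∩ t = s ∩ t := by
  ext k
  simp only [Multiset.count_inter, Multiset.count_cons]
  by_cases hk : k = x <;> simp [hk, h]

-- … and a right head absent from the left side.
theorem pvInterConsRight (y : Char) (s t : Multiset Char) (h : s.count y = 0) :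
    s ∩ (y ::ₘ t) = s ∩ t := by
  ext k
  simp only [Multiset.count_inter, Multiset.count_cons]
  by_cases hk : k = y <;> simp [hk, h]

-- … and a common head.
theorem pvInterConsBoth (x : Char) (s t : Multiset Char) :
    (x ::ₘ s) ∩ (x ::ₘ t) = x ::ₘ (s ∩ t) := by
  ext k
  simp only [Multiset.count_inter, Multiset.count_cons]
  by_cases hk : k = x <;> simp [hk]

-- The two-pointer scan over two sorted lists counts the multiset intersection.
theorem pvMatchCard (a : List Char) : ∀ (b : List Char),
    a.Pairwise (· ≤ ·) → b.Pairwise (· ≤ ·) →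
    anagramMatch a b = ((a : Multiset Char) ∩ (b : Multiset Char)).card := by
  induction a with
  | nil => intro b _ _; simp [anagramMatch]
  | cons x xs iha =>
    intro b
    induction b with
    | nil => intro _ _; simp [anagramMatch]
    | cons y ys ihb =>
      intro hpa hpb
      rw [anagramMatch]
      by_cases hxy : x = y
      · subst hxy
        rw [if_pos rfl, iha ys hpa.of_cons hpb.of_cons]
        rw [show ((x :: xs : List Char) : Multiset Char) = x ::ₘ (xs : Multiset Char) from rfl,
            show ((x :: ys : List Char) : Multiset Char) = x ::ₘ (ys : Multiset Char) from rfl,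
            pvInterConsBoth, Multiset.card_cons]
      · rw [if_neg hxy]
        by_cases hlt : x < y
        · -- x is smaller than everything in y :: ys, hence absent from it
          rw [if_pos hlt, iha (y :: ys) hpa.of_cons hpb]
          have hx : ((y :: ys : List Char) : Multiset Char).count x = 0 := by
            rw [Multiset.count_eq_zero]
            intro hmem
            rcases List.mem_cons.mp (by exact_mod_cast hmem) with rfl | hmem'
            · exact lt_irrefl x hlt
            · exact absurd (List.rel_of_pairwise_cons hpb hmem') (by
                intro hle
                exact absurd (lt_of_lt_of_le hlt hle) (lt_irrefl x))
          rw [show ((x :: xs : List Char) : Multiset Char) = x ::ₘ (xs : Multiset Char) from rfl,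
              pvInterConsLeft x _ _ hx]
        · -- y < x, and y is smaller than everything in x :: xs
          rw [if_neg hlt, ihb hpa hpb.of_cons]
          have hyx : y < x := lt_of_le_of_ne (le_of_not_gt hlt) (fun h => hxy h.symm)
          have hy : ((x :: xs : List Char) : Multiset Char).count y = 0 := by
            rw [Multiset.count_eq_zero]
            intro hmem
            rcases List.mem_cons.mp (by exact_mod_cast hmem) with rfl | hmem'
            · exact lt_irrefl y hyx
            · exact absurd (List.rel_of_pairwise_cons hpa hmem') (by
                intro hle
                exact absurd (lt_of_lt_of_le hyx hle) (lt_irrefl y))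
          rw [show ((y :: ys : List Char) : Multiset Char) = y ::ₘ (ys : Multiset Char) from rfl,
              pvInterConsRight y _ _ hy]

-- A's loop, folded over the list of diffs: the pair of (negative, positive) part sums.
theorem pvFoldShape (ds : List Int) (nacc pacc : Int) :
    ds.foldl (fun (acc : Int × Int) d =>
        let acc2 := if d > 0 then (acc.1, acc.2 + d) else acc
        if d < 0 then (acc2.1 + d, acc2.2) else acc2) (nacc, pacc)
      = (nacc + (ds.map (fun d => if d < 0 then d else 0)).sum,
         pacc + (ds.map (fun d => if 0 < d then d else 0)).sum) := by
  induction ds generalizing nacc pacc with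
  | nil => simp
  | cons d ds ih =>
    simp only [List.foldl_cons, List.map_cons, List.sum_cons]
    by_cases h1 : 0 < d <;> by_cases h2 : d < 0 <;>
      simp only [gt_iff_lt, h1, h2, if_true, if_false, ih] <;>
      first
      | omega
      | (rw [Prod.mk.injEq]; constructor <;> ring)

-- All the sum identities over one key list, in one induction.
theorem pvSums (K : List Char) (f : Char → Int) :
    0 ≤ (K.map (fun k => if 0 < f k then f k else 0)).sum ∧
    (K.map (fun k => if f k < 0 then f k else 0)).sum ≤ 0 ∧
    (K.map (fun k => if 0 < -(f k) then -(f k) else 0)).sum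
      + (K.map (fun k => if f k < 0 then f k else 0)).sum = 0 ∧
    (K.map (fun k => if 0 < f k then f k else 0)).sum
      + (K.map (fun k => if f k < 0 then f k else 0)).sum = (K.map f).sum := by
  induction K with
  | nil => simp
  | cons k K ih =>
    simp only [List.map_cons, List.sum_cons]
    obtain ⟨h1, h2, h3, h4⟩ := ih
    by_cases hk : 0 < f k <;> by_cases hk' : f k < 0 <;>
      simp only [hk, hk', neg_pos, if_true, if_false] at h1 h2 h3 h4 ⊢ <;>
      refine ⟨by omega, by omega, by omega, by omega⟩

-- Splitting a sum of pointwise sums.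
theorem pvSumSplit (K : List Char) (a b : Char → Nat) :
    (K.map (fun k => a k + b k)).sum = (K.map a).sum + (K.map b).sum := by
  induction K with
  | nil => simp
  | cons k K ih => simp only [List.map_cons, List.sum_cons, ih]; omega

-- Summing an equality indicator over a nodup list is a membership test.
theorem pvSumIndicator (x : Char) (K : List Char) (h : K.Nodup) :
    (K.map (fun k => if x = k then 1 else 0)).sum = if x ∈ K then (1 : Nat) else 0 := by
  induction K with
  | nil => simp
  | cons k K ihK =>
    simp only [List.nodup_cons] at h
    by_cases hkx : k = x
    · subst hkx
      simp [ihK h.2, h.1]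
    · simp [Ne.symm hkx, ihK h.2, List.mem_cons]

-- Sum of counts over a nodup key list counts the members of l whose value lies in K.
theorem pvSumCount (K l : List Char) (h : K.Nodup) :
    (K.map (fun k => l.count k)).sum = l.countP (fun x => decide (x ∈ K)) := by
  induction l with
  | nil => simp
  | cons x l ih =>
    have h1 : (K.map (fun k => (x :: l).count k)).sum
        = (K.map (fun k => l.count k + if x = k then 1 else 0)).sum := by
      apply congrArg List.sum
      apply List.map_congr_left
      intro k _
      by_cases hkx : k = x <;> simp [List.count_cons, hkx]
    rw [h1, pvSumSplit, ih, pvSumIndicator x K h, List.countP_cons]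
    by_cases hx : x ∈ K <;> simp [hx]

-- Cast the count sum to Int and subtract.
theorem pvSumSub (K : List Char) (f g : Char → Nat) :
    (K.map (fun k => (f k : Int) - (g k : Int))).sum
      = ((K.map f).sum : Int) - ((K.map g).sum : Int) := by
  induction K with
  | nil => simp
  | cons k K ih => simp only [List.map_cons, List.sum_cons, ih]; push_cast; ring

-- Casting the difference of a count sum and a min-count sum to the Int negative-part sum.
theorem pvCastSum (K : List Char) (f g : Char → Nat) :
    ((K.map f).sum : Int) - ((K.map (fun k => min (f k) (g k))).sum : Int)
      = -(K.map (fun k => if (g k : Int) - (f k : Int) < 0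
            then (g k : Int) - (f k : Int) else 0)).sum := by
  induction K with
  | nil => simp
  | cons k K ih =>
    simp only [List.map_cons, List.sum_cons]
    push_cast
    push_cast at ih
    by_cases h : (g k : Int) - (f k : Int) < 0 <;> simp only [h, if_true, if_false] <;> omega

-- The heart of the equivalence: on two halves of equal length, A's max-of-absolute-values
-- equals the half length minus B's two-pointer match count over the sorted halves.
theorem pvMain (h1 h2 : List Char) (hlen : h1.length = h2.length) :
    max
      |((PySem.Dict.counter h1).items.foldl (fun (acc : Int × Int) lc =>
          let diff := (PySem.Dict.counter h2).getD lc.1 0 - lc.2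
          let acc2 := if diff > 0 then (acc.1, acc.2 + diff) else acc
          if diff < 0 then (acc2.1 + diff, acc2.2) else acc2) ((0 : Int), (0 : Int))).2|
      |((PySem.Dict.counter h1).items.foldl (fun (acc : Int × Int) lc =>
          let diff := (PySem.Dict.counter h2).getD lc.1 0 - lc.2
          let acc2 := if diff > 0 then (acc.1, acc.2 + diff) else acc
          if diff < 0 then (acc2.1 + diff, acc2.2) else acc2) ((0 : Int), (0 : Int))).1|
    = (h1.length : Int)
      - (anagramMatch (PySem.List.sorted h1 (fun c => c) false)
                      (PySem.List.sorted h2 (fun c => c) false) : Int) := by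
  -- B's match count is the cardinality of the multiset intersection of the halves
  have hm : anagramMatch (PySem.List.sorted h1 (fun c => c) false)
        (PySem.List.sorted h2 (fun c => c) false)
      = ((h1 : Multiset Char) ∩ (h2 : Multiset Char)).card := by
    rw [pvMatchCard _ _ (PySem.List.sorted_pairwise h1 (fun c => c))
        (PySem.List.sorted_pairwise h2 (fun c => c))]
    rw [Multiset.coe_eq_coe.mpr (PySem.List.sorted_perm h1 (fun c => c) false),
        Multiset.coe_eq_coe.mpr (PySem.List.sorted_perm h2 (fun c => c) false)]
  set I : Multiset Char := (h1 : Multiset Char) ∩ (h2 : Multiset Char) with hI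
  have hK : (PySem.Dict.counter h1).items
      = (PySem.Set.ofList h1).map (fun k => (k, (List.count k h1 : Int))) :=
    PySem.Dict.items_counter h1
  set K := PySem.Set.ofList h1 with hKdef
  have hnodup : K.Nodup := PySem.Set.nodup_ofList h1
  -- A's fold over the diffs d k = count k h2 - count k h1
  have hA : ((PySem.Dict.counter h1).items.foldl (fun (acc : Int × Int) lc =>
          let diff := (PySem.Dict.counter h2).getD lc.1 0 - lc.2
          let acc2 := if diff > 0 then (acc.1, acc.2 + diff) else acc
          if diff < 0 then (acc2.1 + diff, acc2.2) else acc2) ((0 : Int), (0 : Int)))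
      = (K.map (fun k => (List.count k h2 : Int) - (List.count k h1 : Int))).foldl
          (fun (acc : Int × Int) d =>
            let acc2 := if d > 0 then (acc.1, acc.2 + d) else acc
            if d < 0 then (acc2.1 + d, acc2.2) else acc2) ((0 : Int), (0 : Int)) := by
    rw [hK, List.foldl_map, List.foldl_map]
    simp only [PySem.Dict.getD_counter]
  rw [hA, pvFoldShape]
  simp only [List.map_map, Function.comp_def, zero_add]
  obtain ⟨hP, hN, hBN, hPN⟩ :=
    pvSums K (fun k => (List.count k h2 : Int) - (List.count k h1 : Int))
  -- the total diff over the key set is nonpositive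
  have hsub := pvSumSub K (fun k => List.count k h2) (fun k => List.count k h1)
  have hc2 := pvSumCount K h2 hnodup
  have hc1 := pvSumCount K h1 hnodup
  have hc1' : List.countP (fun x => decide (x ∈ K)) h1 = h1.length := by
    apply List.countP_eq_length.mpr
    intro a ha
    simpa [hKdef, PySem.Set.mem_ofList] using ha
  have hc2' : List.countP (fun x => decide (x ∈ K)) h2 ≤ h2.length :=
    List.countP_le_length
  have htot : (K.map
      (fun k => (List.count k h2 : Int) - (List.count k h1 : Int))).sum ≤ 0 := by
    rw [hsub, hc2, hc1, hc1']
    omega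
  -- the intersection cardinality as a sum of min-counts over K
  have hIcount : ∀ k, I.toList.count k = min (List.count k h1) (List.count k h2) := by
    intro k
    have h0 : I.toList.count k = I.count k := by
      conv_rhs => rw [← Multiset.coe_toList I]
      exact (Multiset.coe_count k I.toList).symm
    rw [h0, hI, Multiset.count_inter]
    simp
  have hImem : ∀ x ∈ I.toList, x ∈ K := by
    intro x hx
    rw [Multiset.mem_toList, hI] at hx
    have : x ∈ (h1 : Multiset Char) := Multiset.mem_inter.mp hx |>.1
    simpa [hKdef, PySem.Set.mem_ofList] using (by exact_mod_cast this : x ∈ h1)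
  have hcard : I.card = (K.map (fun k => min (List.count k h1) (List.count k h2))).sum := by
    have h1' : (K.map (fun k => I.toList.count k)).sum = I.toList.countP (fun x => decide (x ∈ K)) :=
      pvSumCount K I.toList hnodup
    have h2' : I.toList.countP (fun x => decide (x ∈ K)) = I.toList.length := by
      apply List.countP_eq_length.mpr
      intro a ha
      simpa using hImem a ha
    have h3' : (K.map (fun k => I.toList.count k)).sum
        = (K.map (fun k => min (List.count k h1) (List.count k h2))).sum := by
      apply congrArg List.sum
      exact List.map_congr_left (fun k _ => hIcount k)
    rw [← Multiset.length_toList I, ← h2', ← h1', h3']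
  -- h1.length as a sum of counts over K
  have hlen1 : h1.length = (K.map (fun k => List.count k h1)).sum := by
    rw [hc1, hc1']
  have hcast := pvCastSum K (fun k => List.count k h1) (fun k => List.count k h2)
  rw [hm, hcard, hlen1, hcast]
  rw [abs_of_nonneg hP, abs_of_nonpos hN, max_eq_right (by omega)]

-- ===== VERDICT (by name: the statement is the Claim_ definition above) =====
theorem anagram_replace_count_spec : Claim_equal_anagram_replace_count := by
  intro s _
  unfold Spec_anagram_replace_count
  simp only [anagram_replace_count, anagram_replace_count_alt]
  by_cases hpar : PySem.Int.mod (PySem.Str.len s) 2 ≠ 0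
  · rw [if_pos hpar, if_pos hpar]
  · rw [if_neg hpar, if_neg hpar]
    rw [not_not] at hpar
    have hmod : PySem.Int.mod ((s.toList.length : Int)) 2 = ((s.toList.length % 2 : Nat) : Int) := by
      exact_mod_cast PySem.Int.mod_natCast s.toList.length 2
    have heven : s.toList.length % 2 = 0 := by
      rw [PySem.Str.len_eq, hmod] at hpar
      exact_mod_cast hpar
    have hdiv : PySem.Int.floordiv (PySem.Str.len s) 2
        = ((s.toList.length / 2 : Nat) : Int) := by
      rw [PySem.Str.len_eq]
      exact_mod_cast PySem.Int.floordiv_natCast s.toList.length 2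
    have hto : PySem.List.slice s.toList none (some (PySem.Int.floordiv (PySem.Str.len s) 2))
        = s.toList.take (s.toList.length / 2) := by
      rw [hdiv, PySem.List.slice_to _ (by positivity), Int.toNat_natCast]
    have hfrom : PySem.List.slice s.toList (some (PySem.Int.floordiv (PySem.Str.len s) 2)) none
        = s.toList.drop (s.toList.length / 2) := by
      rw [hdiv, PySem.List.slice_from _ (by positivity), Int.toNat_natCast]
    rw [hto, hfrom, hdiv]
    have hmain := pvMain (s.toList.take (s.toList.length / 2))
      (s.toList.drop (s.toList.length / 2))
      (by rw [List.length_take, List.length_drop]; omega)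
    rw [hmain, List.length_take]
    congr 1
    omega
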